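-- pv_equiv track=rewrite | github.com/tianyehedashu/ai-agent | backend/domains/gateway/domain/virtual_key_service.py | is_vkey_format
-- ===== SOURCE A (Python) =====
-- VKEY_PREFIX = "sk-gw-"
--
-- VKEY_KEY_ID_LENGTH = 16
--
-- VKEY_SECRET_LENGTH = 32
--
-- def is_vkey_format(key: str) -> bool:
--     """判断字符串是否符合 vkey 格式"""
--     if not key.startswith(VKEY_PREFIX):
--         return False
--     body = key[len(VKEY_PREFIX) :]
--     if "-" not in body:
--         return False
--     parts = body.split("-", 1)
--     if len(parts) != 2:
--         return False
--     key_id, secret_part = parts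
--     if len(key_id) != VKEY_KEY_ID_LENGTH or len(secret_part) != VKEY_SECRET_LENGTH:
--         return False
--     return all(c in "0123456789abcdef" for c in key_id + secret_part)
-- ===== SOURCE B (Python) =====
-- HEX_DIGITS = "0123456789abcdef"
--
--
-- def _eat_lit(lit, s, i):
--     """Consume the literal lit at cursor i; return new cursor or -1."""
--     return i + len(lit) if s[i:i + len(lit)] == lit else -1
--
--
-- def _eat_hex(n, s, i):
--     """Consume exactly n lowercase hex digits at cursor i; return new cursor or -1."""
--     end = i + n
--     if end > len(s):
--         return -1
--     j = i
--     while j < end: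
--         if s[j] not in HEX_DIGITS:
--             return -1
--         j += 1
--     return end
--
--
-- def is_vkey_format(key: str) -> bool:
--     # hand-compiled single-pass matcher for  sk-gw-[0-9a-f]{16}-[0-9a-f]{32}
--     i = _eat_lit("sk-gw-", key, 0)
--     if i < 0:
--         return False
--     i = _eat_hex(16, key, i)
--     if i < 0:
--         return False
--     i = _eat_lit("-", key, i)
--     if i < 0:
--         return False
--     i = _eat_hex(32, key, i)
--     return i == len(key)
-- ===== Notes on version B (the rewrite author's own statement) =====
-- stated objective: alternative
-- what changed: Replaced A's prefix/substring-split/length/charset pipeline with a single-pass hand-compiled cursor matcher for the fixed pattern sk-gw-[0-9a-f]{16}-[0-9a-f]{32} (eat literal, eat 16 hex, eat '-', eat 32 hex, require end of string).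
import Mathlib
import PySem

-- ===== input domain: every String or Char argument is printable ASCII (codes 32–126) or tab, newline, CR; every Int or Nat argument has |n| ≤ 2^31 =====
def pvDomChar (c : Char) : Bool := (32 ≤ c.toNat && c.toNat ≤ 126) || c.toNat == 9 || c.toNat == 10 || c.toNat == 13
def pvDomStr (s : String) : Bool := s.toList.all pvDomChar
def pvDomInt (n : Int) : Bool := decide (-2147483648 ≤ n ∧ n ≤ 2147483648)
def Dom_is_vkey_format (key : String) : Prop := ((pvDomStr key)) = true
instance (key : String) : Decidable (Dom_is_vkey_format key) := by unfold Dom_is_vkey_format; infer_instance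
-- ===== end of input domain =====

-- B replaces A's prefix/split/length/charset pipeline by a single-pass cursor matcher for the
-- fixed pattern sk-gw-[0-9a-f]{16}-[0-9a-f]{32}; same return value, no speed claim.


-- ===== PORT A =====
def VKEY_PREFIX : String := "sk-gw-"
def VKEY_KEY_ID_LENGTH : Nat := 16
def VKEY_SECRET_LENGTH : Nat := 32

def is_vkey_format (key : String) : Bool :=
  if ¬ (PySem.Str.startswith key VKEY_PREFIX) then false
  else
    let body : List Char :=
      PySem.Chars.slice key.toList (some (PySem.Chars.len VKEY_PREFIX.toList)) none
    if ¬ (PySem.Chars.isIn ['-'] body) then false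
    else
      -- body.split("-", 1), ported by hand (exact for the single-character separator "-",
      -- maxsplit 1: first piece = chars before the first '-', second piece = the rest)
      let parts : List (List Char) :=
        if '-' ∈ body then [body.takeWhile (· ≠ '-'), (body.dropWhile (· ≠ '-')).tail]
        else [body]
      if parts.length ≠ 2 then false
      else
        match parts with
        | [key_id, secret_part] =>
          if key_id.length ≠ VKEY_KEY_ID_LENGTH ∨ secret_part.length ≠ VKEY_SECRET_LENGTH then false
          else (key_id ++ secret_part).all (fun c => PySem.Chars.isIn [c] "0123456789abcdef".toList)
        | _ => false

-- ===== PORT B =====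
def pvHexClass (c : Char) : Bool := "0123456789abcdef".toList.contains c

-- _eat_lit: consume a literal (cursor-on-list form: the returned list is the suffix after the cursor)
def pvEatLit : List Char → List Char → Option (List Char)
  | [], cs => some cs
  | _ :: _, [] => none
  | p :: ps, c :: cs => if c = p then pvEatLit ps cs else none

-- _eat_hex: consume exactly n lowercase hex digits
def pvEatHex : Nat → List Char → Option (List Char)
  | 0, cs => some cs
  | _ + 1, [] => none
  | n + 1, c :: cs => if pvHexClass c then pvEatHex n cs else none

def is_vkey_format_alt (key : String) : Bool :=
  match pvEatLit "sk-gw-".toList key.toList with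
  | none => false
  | some r₁ =>
    match pvEatHex 16 r₁ with
    | none => false
    | some r₂ =>
      match pvEatLit ['-'] r₂ with
      | none => false
      | some r₃ => decide (pvEatHex 32 r₃ = some [])

-- ===== PRECONDITION & SPEC =====
def Spec_is_vkey_format (key : String) (out : Bool) : Prop := out = is_vkey_format_alt key
instance (key : String) (out : Bool) : Decidable (Spec_is_vkey_format key out) := by unfold Spec_is_vkey_format; infer_instance

-- ===== CLAIM (what is proved, stated in full; the proofs are below) =====
def Claim_equal_is_vkey_format : Prop := ∀ (key : String), Dom_is_vkey_format key → Spec_is_vkey_format key (is_vkey_format key)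

-- ===== LEMMAS AND PROOFS =====

lemma pvEatLit_eq_some (p cs r : List Char) : pvEatLit p cs = some r ↔ cs = p ++ r := by
  induction p generalizing cs with
  | nil => simp [pvEatLit]
  | cons x xs ih =>
    cases cs with
    | nil => simp [pvEatLit]
    | cons c cs =>
      by_cases h : c = x
      · subst h; simp [pvEatLit, ih]
      · simp [pvEatLit, h]

lemma pvEatHex_eq_some (n : Nat) (cs r : List Char) :
    pvEatHex n cs = some r ↔ ∃ p, cs = p ++ r ∧ p.length = n ∧ p.all pvHexClass := by
  induction n generalizing cs with
  | zero =>
    constructor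
    · intro h
      obtain rfl : cs = r := by simpa [pvEatHex] using h
      exact ⟨[], rfl, rfl, rfl⟩
    · rintro ⟨p, rfl, hl, _⟩
      obtain rfl : p = [] := List.eq_nil_of_length_eq_zero hl
      rfl
  | succ n ih =>
    cases cs with
    | nil =>
      constructor
      · intro h; simp [pvEatHex] at h
      · rintro ⟨p, hcs, hl, _⟩
        cases p <;> simp_all
    | cons c cs =>
      by_cases hc : pvHexClass c
      · rw [show pvEatHex (n + 1) (c :: cs) = pvEatHex n cs by simp [pvEatHex, hc], ih]
        constructor
        · rintro ⟨p, rfl, hl, hall⟩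
          exact ⟨c :: p, rfl, by simp [hl], by simp [List.all_cons, hc, hall]⟩
        · rintro ⟨p, hcs, hl, hall⟩
          cases p with
          | nil => simp at hl
          | cons a q =>
            simp only [List.cons_append, List.cons.injEq] at hcs
            obtain ⟨rfl, rfl⟩ := hcs
            exact ⟨q, rfl, by simpa using hl, by simp only [List.all_cons, Bool.and_eq_true] at hall; exact hall.2⟩
      · constructor
        · intro h; simp [pvEatHex, hc] at h
        · rintro ⟨p, hcs, hl, hall⟩
          cases p with
          | nil => simp at hl
          | cons a q =>
            simp only [List.cons_append, List.cons.injEq] at hcs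
            obtain ⟨rfl, -⟩ := hcs
            simp [List.all_cons, hc] at hall

-- takeWhile/dropWhile over an append whose first block satisfies the predicate
lemma pv_takeWhile_app {α} (P : α → Bool) (p q : List α) (a : α)
    (h : ∀ x ∈ p, P x = true) (ha : P a = false) :
    (p ++ a :: q).takeWhile P = p ∧ (p ++ a :: q).dropWhile P = a :: q := by
  induction p with
  | nil => simp [ha]
  | cons x xs ih =>
    have hx : P x = true := h x (List.mem_cons_self ..)
    have := ih (fun y hy => h y (List.mem_cons_of_mem _ hy))
    simp [hx, this.1, this.2]

-- decomposition of a list at the first occurrence of a member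
lemma pv_split_at_mem {α} [DecidableEq α] (a : α) (l : List α) (h : a ∈ l) :
    l = l.takeWhile (fun x => !decide (x = a)) ++ a :: (l.dropWhile (fun x => !decide (x = a))).tail := by
  induction l with
  | nil => cases h
  | cons x xs ih =>
    by_cases hx : x = a
    · subst hx; simp
    · have hmem : a ∈ xs := by
        rcases List.mem_cons.mp h with h' | h'
        · exact absurd h'.symm hx
        · exact h'
      conv_lhs => rw [ih hmem]
      simp [hx]

lemma pv_isIn_singleton (c : Char) (l : List Char) :
    PySem.Chars.isIn [c] l = true ↔ c ∈ l := by
  rw [PySem.Chars.isIn_iff_infix]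
  constructor
  · intro h; exact (List.singleton_sublist.mp h.sublist)
  · intro h
    obtain ⟨s, t, rfl⟩ := List.append_of_mem h
    exact ⟨s, t, by simp⟩

lemma pv_hex_elem (c : Char) :
    PySem.Chars.isIn [c] ['0', '1', '2', '3', '4', '5', '6', '7', '8', '9', 'a', 'b', 'c', 'd', 'e', 'f'] = pvHexClass c := by
  rw [Bool.eq_iff_iff, pv_isIn_singleton]
  simp [pvHexClass]

lemma pv_alt_iff (key : String) :
    is_vkey_format_alt key = true ↔
    ∃ p q : List Char, key.toList = "sk-gw-".toList ++ p ++ '-' :: q ∧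
      p.length = 16 ∧ p.all pvHexClass ∧ q.length = 32 ∧ q.all pvHexClass := by
  unfold is_vkey_format_alt
  cases h1 : pvEatLit "sk-gw-".toList key.toList with
  | none =>
    constructor
    · intro h; simp at h
    · rintro ⟨p, q, hcs, -, -, -, -⟩
      have h1' : pvEatLit "sk-gw-".toList key.toList = some (p ++ '-' :: q) :=
        (pvEatLit_eq_some _ _ _).mpr (by simpa [List.append_assoc] using hcs)
      rw [h1] at h1'; cases h1'
  | some r₁ =>
    have hr₁ : key.toList = "sk-gw-".toList ++ r₁ := (pvEatLit_eq_some _ _ _).mp h1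
    cases h2 : pvEatHex 16 r₁ with
    | none =>
      constructor
      · intro h; simp [h2] at h
      · rintro ⟨p, q, hcs, h16, hallp, -, -⟩
        have hreq : r₁ = p ++ '-' :: q := by
          apply List.append_cancel_left (as := "sk-gw-".toList)
          rw [← hr₁, hcs, List.append_assoc]
        have h2' : pvEatHex 16 r₁ = some ('-' :: q) :=
          (pvEatHex_eq_some _ _ _).mpr ⟨p, hreq, h16, hallp⟩
        rw [h2] at h2'; cases h2'
    | some r₂ =>
      obtain ⟨p, hr₂, h16, hallp⟩ := (pvEatHex_eq_some _ _ _).mp h2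
      cases h3 : pvEatLit ['-'] r₂ with
      | none =>
        constructor
        · intro h; simp [h2, h3] at h
        · rintro ⟨p', q, hcs, h16', hallp', -, -⟩
          have hreq : r₁ = p' ++ '-' :: q := by
            apply List.append_cancel_left (as := "sk-gw-".toList)
            rw [← hr₁, hcs, List.append_assoc]
          have h2' : pvEatHex 16 r₁ = some ('-' :: q) :=
            (pvEatHex_eq_some _ _ _).mpr ⟨p', hreq, h16', hallp'⟩
          rw [h2] at h2'
          obtain rfl : r₂ = '-' :: q := by simpa using h2'
          have h3' : pvEatLit ['-'] ('-' :: q) = some q :=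
            (pvEatLit_eq_some _ _ _).mpr rfl
          rw [h3] at h3'; cases h3'
      | some r₃ =>
        have hr₃ : r₂ = '-' :: r₃ := (pvEatLit_eq_some _ _ _).mp h3
        constructor
        · intro h
          have hfin : pvEatHex 32 r₃ = some [] := by simpa [h2, h3] using h
          obtain ⟨q, hq, h32, hallq⟩ := (pvEatHex_eq_some _ _ _).mp hfin
          have hq' : r₃ = q := by simpa using hq
          exact ⟨p, q, by rw [hr₁, hr₂, hr₃, hq']; simp, h16, hallp, h32, hallq⟩
        · rintro ⟨p', q, hcs, h16', hallp', h32, hallq⟩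
          have hreq : r₁ = p' ++ '-' :: q := by
            apply List.append_cancel_left (as := "sk-gw-".toList)
            rw [← hr₁, hcs, List.append_assoc]
          have h2' : pvEatHex 16 r₁ = some ('-' :: q) :=
            (pvEatHex_eq_some _ _ _).mpr ⟨p', hreq, h16', hallp'⟩
          rw [h2] at h2'
          obtain rfl : r₂ = '-' :: q := by simpa using h2'
          obtain rfl : r₃ = q := by simpa using hr₃.symm
          have hfin : pvEatHex 32 r₃ = some [] :=
            (pvEatHex_eq_some _ _ _).mpr ⟨r₃, by simp, h32, hallq⟩
          simp [h2, h3, hfin]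

lemma pv_a_iff (key : String) :
    is_vkey_format key = true ↔
    ∃ p q : List Char, key.toList = "sk-gw-".toList ++ p ++ '-' :: q ∧
      p.length = 16 ∧ p.all pvHexClass ∧ q.length = 32 ∧ q.all pvHexClass := by
  unfold is_vkey_format
  by_cases hpre : PySem.Str.startswith key VKEY_PREFIX = true
  case neg =>
    simp only [hpre]
    constructor
    · intro h; simp at h
    · rintro ⟨p, q, hcs, -, -, -, -⟩
      exact absurd (by
        simp only [PySem.Str.startswith_eq, PySem.Chars.startswith_iff]
        exact ⟨p ++ '-' :: q, by rw [hcs]; rfl⟩) hpre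
  case pos =>
    obtain ⟨t, ht⟩ : VKEY_PREFIX.toList <+: key.toList := by
      rw [← PySem.Chars.startswith_iff, ← PySem.Str.startswith_eq]; exact hpre
    have hbody : PySem.Chars.slice key.toList (some (PySem.Chars.len VKEY_PREFIX.toList)) none
        = t := by
      have h6 : PySem.Chars.len VKEY_PREFIX.toList = ((6 : Nat) : Int) := by decide
      rw [h6, PySem.Chars.slice_eq_listSlice, PySem.List.slice_from_natCast, ← ht]
      rfl
    simp only [hpre, hbody]
    have hcs : key.toList = VKEY_PREFIX.toList ++ t := ht.symm
    by_cases hin : '-' ∈ t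
    case neg =>
      have hIn : PySem.Chars.isIn ['-'] t = false := by
        rw [← pv_isIn_singleton] at hin
        simpa using hin
      simp only [hIn]
      constructor
      · intro h; simp at h
      · rintro ⟨p, q, hcs', -, -, -, -⟩
        have ht' : t = p ++ '-' :: q := by
          apply List.append_cancel_left (as := VKEY_PREFIX.toList)
          rw [← hcs, hcs']; rfl
        exact absurd (by rw [ht']; simp) hin
    case pos =>
      have hIn : PySem.Chars.isIn ['-'] t = true := (pv_isIn_singleton '-' t).mpr hin
      simp only [hIn, hin]
      constructor
      · intro h
        simp [VKEY_KEY_ID_LENGTH, VKEY_SECRET_LENGTH] at h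
        obtain ⟨⟨h16, h32⟩, hp, hq⟩ := h
        refine ⟨List.takeWhile (fun x => !decide (x = '-')) t,
                (List.dropWhile (fun x => !decide (x = '-')) t).tail, ?_, h16, ?_, ?_, ?_⟩
        · rw [hcs]
          conv_lhs => rw [pv_split_at_mem '-' t hin]
          rfl
        · exact List.all_eq_true.mpr fun c hc => by rw [← pv_hex_elem c]; exact hp c hc
        · rw [List.length_tail, h32]
        · exact List.all_eq_true.mpr fun c hc => by rw [← pv_hex_elem c]; exact hq c hc
      · rintro ⟨p, q, hcs', h16, hallp, h32, hallq⟩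
        have ht' : t = p ++ '-' :: q := by
          apply List.append_cancel_left (as := VKEY_PREFIX.toList)
          rw [← hcs, hcs']; rfl
        have hnp : ∀ x ∈ p, (fun x => !decide (x = '-')) x = true := by
          intro x hx
          have hhx := List.all_eq_true.mp hallp x hx
          by_contra hbad
          simp only [Bool.not_eq_true, Bool.not_eq_false'] at hbad
          rw [of_decide_eq_true hbad] at hhx
          simp [pvHexClass] at hhx
        have htw := pv_takeWhile_app (fun x => !decide (x = '-')) p q '-' hnp (by simp)
        rw [ht']
        simp [VKEY_KEY_ID_LENGTH, VKEY_SECRET_LENGTH]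
        refine ⟨⟨?_, ?_⟩, ?_, ?_⟩
        · rw [htw.1]; exact h16
        · rw [htw.2]; simp [h32]
        · rw [htw.1]
          exact fun x hx => by rw [pv_hex_elem]; exact List.all_eq_true.mp hallp x hx
        · rw [htw.2]; simp only [List.tail_cons]
          exact fun x hx => by rw [pv_hex_elem]; exact List.all_eq_true.mp hallq x hx

lemma pv_main (key : String) : is_vkey_format key = is_vkey_format_alt key := by
  rw [Bool.eq_iff_iff, pv_a_iff, pv_alt_iff]

-- ===== VERDICT (by name: the statement is the Claim_ definition above) =====
theorem is_vkey_format_spec : Claim_equal_is_vkey_format := by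
  intro key _
  exact pv_main key
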